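-- pv_equiv track=rewrite | github.com/emrearslandogan/homeworks | ceng111/the2/tester/tester/the2.py | rule3
-- ===== SOURCE A (Python) =====
-- def rule3(calendar, cost, final_errors): # babysitter
--     # finding babysitter's days
--     enumcalendar = enumerate(calendar)
--     bsitterdays = list(filter(lambda x: x[1] == "b", enumcalendar))
--     bsitterdaysfinal = [t[0] for t in bsitterdays]
--
--     temp = [t + 2*(t//5) for t in bsitterdaysfinal]  # it takes weekends into consideration
--
--     differenceMap = [int(temp[e+1]) - int(temp[e]) for e in range(len(temp) -1)]
--
--     formattedDifference = [int(differenceMap[e]) - 1 if int(differenceMap[e]) < 4 and int(differenceMap[e]) != 1 else 0 for e in range(len(temp) -1)]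
--     interveningDays = sum(formattedDifference)
--
--     cost += (len(bsitterdaysfinal) + interveningDays )* 30
--     return cost, final_errors
-- ===== SOURCE B (Python) =====
-- def rule3(calendar, cost, final_errors):  # babysitter: mark adjusted b-days in a set, then stencil-scan the adjusted timeline
--     booked = set()
--     count = 0
--     for i, day in enumerate(calendar):
--         if day == "b":
--             booked.add(i + 2 * (i // 5))
--             count += 1
--     horizon = len(calendar) + 2 * (len(calendar) // 5)
--     intervening = 0
--     for m in range(1, horizon):
--         if m not in booked:
--             if (m - 1 in booked and (m + 1 in booked or m + 2 in booked)) \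
--                or (m - 2 in booked and m - 1 not in booked and m + 1 in booked):
--                 intervening += 1
--     return cost + (count + intervening) * 30, final_errors
-- ===== Notes on version B (the rewrite author's own statement) =====
-- stated objective: alternative
-- what changed: Instead of A's pairwise differences of consecutive babysitter indices (five staged list comprehensions), B marks each adjusted babysitter day in a set and then scans the adjusted timeline once, counting every free day whose neighbourhood stencil (booked day 1-2 slots before and 1-2 slots after, with a consecutive-pair span of at most 3) shows it lies between two close babysitter days.
import Mathlib
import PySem

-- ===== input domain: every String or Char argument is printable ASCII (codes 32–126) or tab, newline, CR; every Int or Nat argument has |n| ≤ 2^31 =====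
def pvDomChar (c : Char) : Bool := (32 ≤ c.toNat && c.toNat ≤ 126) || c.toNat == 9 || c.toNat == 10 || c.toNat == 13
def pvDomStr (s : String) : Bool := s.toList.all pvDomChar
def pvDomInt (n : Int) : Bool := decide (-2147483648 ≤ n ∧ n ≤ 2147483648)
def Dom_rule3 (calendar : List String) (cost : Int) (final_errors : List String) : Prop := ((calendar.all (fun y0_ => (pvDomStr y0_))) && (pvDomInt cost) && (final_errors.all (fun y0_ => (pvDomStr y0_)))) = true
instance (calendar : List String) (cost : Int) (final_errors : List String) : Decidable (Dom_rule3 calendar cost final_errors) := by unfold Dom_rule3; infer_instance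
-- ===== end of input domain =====

-- B drops A's staged pairwise-difference lists: it marks adjusted babysitter days in a set and
-- stencil-scans the adjusted timeline once for intervening days; objective: alternative.

-- ===== PORT A =====
def rule3 (calendar : List String) (cost : Int) (final_errors : List String) : Int × List String :=
  let bsitterdays := (PySem.List.enumerate calendar 0).filter (fun x => x.2 == "b")
  let bsitterdaysfinal := bsitterdays.map (fun t => t.1)
  let temp := bsitterdaysfinal.map (fun t => t + 2 * PySem.Int.floordiv t 5)
  let differenceMap := (PySem.List.pyRange 0 ((temp.length : Int) - 1) 1).map
      (fun e => PySem.List.pyGetD temp (e + 1) 0 - PySem.List.pyGetD temp e 0)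
  let formattedDifference := (PySem.List.pyRange 0 ((temp.length : Int) - 1) 1).map
      (fun e => if PySem.List.pyGetD differenceMap e 0 < 4 ∧ PySem.List.pyGetD differenceMap e 0 ≠ 1
                then PySem.List.pyGetD differenceMap e 0 - 1 else 0)
  let interveningDays := formattedDifference.sum
  (cost + ((bsitterdaysfinal.length : Int) + interveningDays) * 30, final_errors)

-- ===== PORT B =====
def rule3_alt (calendar : List String) (cost : Int) (final_errors : List String) : Int × List String :=
  let st := (PySem.List.enumerate calendar 0).foldl
    (fun (s : PySem.Set Int × Int) p =>
      if p.2 == "b" then (PySem.Set.add s.1 (p.1 + 2 * PySem.Int.floordiv p.1 5), s.2 + 1) else s)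
    (PySem.Set.ofList [], 0)
  let booked := st.1
  let count := st.2
  let horizon : Int := (calendar.length : Int) + 2 * PySem.Int.floordiv (calendar.length : Int) 5
  let intervening := (PySem.List.pyRange 1 horizon 1).foldl
    (fun (acc : Int) m =>
      if (!(PySem.Set.contains booked m) &&
          ((PySem.Set.contains booked (m - 1) && (PySem.Set.contains booked (m + 1) || PySem.Set.contains booked (m + 2))) ||
           (PySem.Set.contains booked (m - 2) && !(PySem.Set.contains booked (m - 1)) && PySem.Set.contains booked (m + 1))))
      then acc + 1 else acc) 0
  (cost + (count + intervening) * 30, final_errors)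

-- ===== PRECONDITION & SPEC =====
def Spec_rule3 (calendar : List String) (cost : Int) (final_errors : List String) (out : Int × List String) : Prop := out = rule3_alt calendar cost final_errors
instance (calendar : List String) (cost : Int) (final_errors : List String) (out : Int × List String) : Decidable (Spec_rule3 calendar cost final_errors out) := by unfold Spec_rule3; infer_instance

-- ===== CLAIM (what is proved, stated in full; the proofs are below) =====
def Claim_equal_rule3 : Prop := ∀ (calendar : List String) (cost : Int) (final_errors : List String), Dom_rule3 calendar cost final_errors → Spec_rule3 calendar cost final_errors (rule3 calendar cost final_errors)

-- ===== LEMMAS AND PROOFS =====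

/-- The per-gap contribution A sums. -/
def pvF (d : Int) : Int := if d < 4 ∧ d ≠ 1 then d - 1 else 0

/-- Sum of `pvF` over the gaps between consecutive elements, seeded with an optional previous element. -/
def pvPd : Option Int → List Int → Int
  | _, [] => 0
  | prev, x :: xs => (match prev with | some p => pvF (x - p) | none => 0) + pvPd (some x) xs

/-- B's stencil condition, expressed over membership in the list of adjusted babysitter days. -/
def pvCond (L : List Int) (m : Int) : Bool :=
  decide (m ∉ L ∧ ((m - 1 ∈ L ∧ (m + 1 ∈ L ∨ m + 2 ∈ L)) ∨ (m - 2 ∈ L ∧ m - 1 ∉ L ∧ m + 1 ∈ L)))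

/-- Collapse A's double indexing and shift of the head: the formatted-difference sum is `pvPd`. -/
theorem sumShift (L : List Int) (x : Int) :
    (((List.range L.length).map (fun k =>
        pvF ((x :: L).getD (k + 1) 0 - (x :: L).getD k 0))).sum) = pvPd (some x) L := by
  induction L generalizing x with
  | nil => simp [pvPd]
  | cons y r ih =>
    simp only [List.length_cons]
    rw [List.range_succ_eq_map]
    simp only [List.map_cons, List.map_map, List.sum_cons]
    rw [show ((fun k => pvF ((x :: y :: r).getD (k + 1) 0 - (x :: y :: r).getD k 0)) ∘ (fun i => i + 1)) =
        (fun k => pvF ((y :: r).getD (k + 1) 0 - (y :: r).getD k 0)) from by funext k; simp]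
    rw [ih]
    simp [pvPd]

/-- A's formatted-difference sum over a list of adjusted indices equals `pvPd none`. -/
theorem sumA (L : List Int) :
    ((PySem.List.pyRange 0 ((L.length : Int) - 1) 1).map
      (fun e => if PySem.List.pyGetD ((PySem.List.pyRange 0 ((L.length : Int) - 1) 1).map
                     (fun e' => PySem.List.pyGetD L (e' + 1) 0 - PySem.List.pyGetD L e' 0)) e 0 < 4 ∧
                   PySem.List.pyGetD ((PySem.List.pyRange 0 ((L.length : Int) - 1) 1).map
                     (fun e' => PySem.List.pyGetD L (e' + 1) 0 - PySem.List.pyGetD L e' 0)) e 0 ≠ 1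
                then PySem.List.pyGetD ((PySem.List.pyRange 0 ((L.length : Int) - 1) 1).map
                     (fun e' => PySem.List.pyGetD L (e' + 1) 0 - PySem.List.pyGetD L e' 0)) e 0 - 1 else 0)).sum
    = pvPd none L := by
  cases L with
  | nil => simp [PySem.List.pyRange_one_eq_nil, pvPd]
  | cons x xs =>
    have hlen : (((x :: xs).length : Int) - 1) = (xs.length : Int) := by simp
    rw [hlen]
    have h1 : ∀ e ∈ PySem.List.pyRange 0 (xs.length : Int) 1,
        (if PySem.List.pyGetD ((PySem.List.pyRange 0 (xs.length : Int) 1).map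
               (fun e' => PySem.List.pyGetD (x :: xs) (e' + 1) 0 - PySem.List.pyGetD (x :: xs) e' 0)) e 0 < 4 ∧
             PySem.List.pyGetD ((PySem.List.pyRange 0 (xs.length : Int) 1).map
               (fun e' => PySem.List.pyGetD (x :: xs) (e' + 1) 0 - PySem.List.pyGetD (x :: xs) e' 0)) e 0 ≠ 1
          then PySem.List.pyGetD ((PySem.List.pyRange 0 (xs.length : Int) 1).map
               (fun e' => PySem.List.pyGetD (x :: xs) (e' + 1) 0 - PySem.List.pyGetD (x :: xs) e' 0)) e 0 - 1 else 0)
        = pvF (PySem.List.pyGetD (x :: xs) (e + 1) 0 - PySem.List.pyGetD (x :: xs) e 0) := by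
      intro e he
      rw [PySem.List.mem_pyRange_one] at he
      obtain ⟨k, rfl⟩ : ∃ k : Nat, e = (k : Int) := ⟨e.toNat, (Int.toNat_of_nonneg he.1).symm⟩
      have hk : k < xs.length := by exact_mod_cast he.2
      rw [PySem.List.pyGetD_map_pyRange _ _ _ _ hk]
      simp [pvF]
    rw [List.map_congr_left h1]
    rw [PySem.List.pyRange_one]
    simp only [sub_zero, Int.toNat_natCast, List.map_map]
    have h2 : ∀ k ∈ List.range xs.length,
        ((fun e => pvF (PySem.List.pyGetD (x :: xs) (e + 1) 0 - PySem.List.pyGetD (x :: xs) e 0)) ∘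
          (fun k : Nat => (0 : Int) + ↑k)) k
        = pvF ((x :: xs).getD (k + 1) 0 - (x :: xs).getD k 0) := by
      intro k _
      simp only [Function.comp, zero_add]
      have h3 : ((k : Int) + 1) = ((k + 1 : Nat) : Int) := by push_cast; ring
      rw [h3, PySem.List.pyGetD_natCast, PySem.List.pyGetD_natCast]
    rw [List.map_congr_left h2, sumShift]
    simp [pvPd]

/-- `countP` of a pointwise-disjoint disjunction splits. -/
theorem countP_or_disj (l : List Int) (p q : Int → Bool)
    (h : ∀ x ∈ l, ¬(p x = true ∧ q x = true)) :
    l.countP (fun x => p x || q x) = l.countP p + l.countP q := by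
  induction l with
  | nil => simp
  | cons x xs ih =>
    have hx := h x (List.mem_cons_self)
    rw [List.countP_cons, List.countP_cons, List.countP_cons,
        ih (fun y hy => h y (List.mem_cons_of_mem _ hy))]
    cases hp : p x <;> cases hq : q x <;> simp_all <;> omega

/-- On a value left of every element of the list, the stencil is off. -/
theorem cond_false_of_lt (b : Int) (rest : List Int)
    (hM : ∀ x ∈ b :: rest, b ≤ x) (m : Int) (hm : m < b) :
    pvCond (b :: rest) m = false := by
  apply decide_eq_false
  rintro ⟨-, ⟨h1, -⟩ | ⟨h2, -, -⟩⟩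
  · exact absurd (hM _ h1) (by omega)
  · exact absurd (hM _ h2) (by omega)

/-- Peeling the smallest adjusted day: the stencil for `a :: M` is the stencil for `M`
    plus the window strictly between `a` and the next day when their gap is ≤ 3. -/
theorem cond_cons (a b : Int) (rest : List Int) (hab : a < b)
    (hM : ∀ x ∈ rest, b ≤ x) (m : Int) :
    pvCond (a :: b :: rest) m =
      (pvCond (b :: rest) m || decide (a < m ∧ m < b ∧ b - a ≤ 3)) := by
  by_cases h1 : m ∈ rest <;> by_cases h2 : m - 1 ∈ rest <;> by_cases h3 : m - 2 ∈ rest <;>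
    by_cases h4 : m + 1 ∈ rest <;> by_cases h5 : m + 2 ∈ rest <;>
  all_goals (
    (try have k1 : b ≤ m := hM _ h1);
    (try have k2 : b ≤ m - 1 := hM _ h2);
    (try have k3 : b ≤ m - 2 := hM _ h3);
    (try have k4 : b ≤ m + 1 := hM _ h4);
    (try have k5 : b ≤ m + 2 := hM _ h5);
    rw [Bool.eq_iff_iff];
    simp only [pvCond, List.mem_cons, or_false, or_true, true_or, false_or, and_true, true_and,
      and_false, false_and, not_true, false_iff,
      decide_eq_true_eq, Bool.or_eq_true, h1, h2, h3, h4, h5];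
    try omega)

/-- The stencil count over the whole timeline is A's pairwise-gap sum. -/
theorem countCond (L : List Int) (W : Int)
    (hch : L.Pairwise (· < ·)) (hpos : ∀ x ∈ L, 0 ≤ x) (hlt : ∀ x ∈ L, x < W) :
    (((PySem.List.pyRange 1 W 1).countP (pvCond L) : Int)) = pvPd none L := by
  induction L with
  | nil =>
    rw [List.countP_eq_zero.mpr]
    · simp [pvPd]
    · intro m _; simp [pvCond]
  | cons a M ih =>
    cases M with
    | nil =>
      rw [List.countP_eq_zero.mpr]
      · simp [pvPd]
      · intro m _
        simp only [pvCond, List.mem_cons, List.not_mem_nil, or_false, decide_eq_true_eq]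
        omega
    | cons b rest =>
      have ha : 0 ≤ a := hpos _ List.mem_cons_self
      have hab : a < b := (List.pairwise_cons.mp hch).1 _ List.mem_cons_self
      have hbW : b < W := hlt _ (List.mem_cons_of_mem _ List.mem_cons_self)
      have hMrest : ∀ x ∈ rest, b ≤ x := fun x hx =>
        le_of_lt ((List.pairwise_cons.mp (List.pairwise_cons.mp hch).2).1 _ hx)
      have hMfull : ∀ x ∈ b :: rest, b ≤ x := by
        intro x hx
        rcases List.mem_cons.mp hx with rfl | hx
        · exact le_refl _
        · exact hMrest _ hx
      rw [List.countP_congr (fun m _ => by rw [cond_cons a b rest hab hMrest m])]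
      rw [countP_or_disj _ _ _ (by
        intro m _ ⟨hc, hq⟩
        rw [cond_false_of_lt b rest hMfull m (by simpa using (of_decide_eq_true hq).2.1)] at hc
        exact Bool.false_ne_true hc)]
      have hqual : (PySem.List.pyRange 1 W 1).countP (fun m => decide (a < m ∧ m < b ∧ b - a ≤ 3))
          = if b - a ≤ 3 then (b - a - 1).toNat else 0 := by
        by_cases hba : b - a ≤ 3
        · rw [if_pos hba]
          rw [List.countP_congr (q := fun m => decide (m ∈ PySem.List.pyRange (a+1) b 1))
            (fun m _ => by
              simp only [decide_eq_true_eq, PySem.List.mem_pyRange_one]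
              omega)]
          rw [List.countP_eq_length_filter]
          rw [PySem.List.pyRange_one_append 1 (a+1) W (by omega) (by omega),
              PySem.List.pyRange_one_append (a+1) b W (by omega) (by omega)]
          rw [List.filter_append, List.filter_append]
          rw [List.filter_eq_nil_iff.mpr (by
            intro m hm
            rw [PySem.List.mem_pyRange_one] at hm
            simp only [decide_eq_true_eq, PySem.List.mem_pyRange_one]
            omega)]
          rw [List.filter_eq_self.mpr (by
            intro m hm
            simpa using hm)]
          rw [List.filter_eq_nil_iff.mpr (by
            intro m hm
            rw [PySem.List.mem_pyRange_one] at hm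
            simp only [decide_eq_true_eq, PySem.List.mem_pyRange_one]
            omega)]
          simp only [List.length_nil, List.length_append, PySem.List.length_pyRange_one]
          omega
        · rw [if_neg hba, List.countP_eq_zero.mpr]
          intro m _
          simp only [decide_eq_true_eq]
          omega
      rw [hqual]
      have ihM := ih (List.pairwise_cons.mp hch).2
        (fun x hx => hpos _ (List.mem_cons_of_mem _ hx))
        (fun x hx => hlt _ (List.mem_cons_of_mem _ hx))
      push_cast
      rw [ihM]
      have : pvPd none (a :: b :: rest) = pvF (b - a) + pvPd none (b :: rest) := by
        simp [pvPd]
      rw [this]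
      simp only [pvF]
      split_ifs <;> omega

-- ===== VERDICT (by name: the statement is the Claim_ definition above) =====
theorem rule3_spec : Claim_equal_rule3 := by
  intro calendar cost final_errors _
  unfold Spec_rule3 rule3 rule3_alt
  dsimp only
  rw [PySem.List.foldl_if_eq_foldl_filter (p := fun x : Int × String => x.2 == "b")
      (f := fun (s : PySem.Set Int × Int) p => (PySem.Set.add s.1 (p.1 + 2 * PySem.Int.floordiv p.1 5), s.2 + 1))]
  rw [PySem.List.foldl_prod_mk (f := fun (x : PySem.Set Int) (e : Int × String) => PySem.Set.add x (e.1 + 2 * PySem.Int.floordiv e.1 5))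
      (g := fun (c : Int) (e : Int × String) => c + 1)]
  set flt := (PySem.List.enumerate calendar 0).filter (fun x => x.2 == "b") with hflt
  set L := flt.map (fun t : Int × String => t.1 + 2 * PySem.Int.floordiv t.1 5) with hL
  set W : Int := (calendar.length : Int) + 2 * PySem.Int.floordiv (calendar.length : Int) 5 with hW
  -- membership in the built set is membership in L
  have hmem : ∀ y : Int,
      (PySem.Set.contains (flt.foldl (fun (x : PySem.Set Int) (e : Int × String) =>
        PySem.Set.add x (e.1 + 2 * PySem.Int.floordiv e.1 5)) (PySem.Set.ofList [])) y = true) ↔ y ∈ L := by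
    intro y
    rw [PySem.Set.contains_iff, PySem.Set.mem_foldl_add]
    simp only [hL, List.mem_map, PySem.Set.ofList_nil, List.not_mem_nil, false_or]
    constructor
    · rintro ⟨e, he, rfl⟩; exact ⟨e, he, rfl⟩
    · rintro ⟨e, he, rfl⟩; exact ⟨e, he, rfl⟩
  -- the count component
  have hcnt : flt.foldl (fun (c : Int) (e : Int × String) => c + 1) 0 = (flt.length : Int) := by
    rw [show (fun (c : Int) (e : Int × String) => c + 1)
        = (fun (c : Int) (e : Int × String) => c + (fun _ : Int × String => (1 : Int)) e) from rfl,
      PySem.List.foldl_add]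
    simp
  -- the stencil fold is the countP of pvCond L
  have hint : (PySem.List.pyRange 1 W 1).foldl
      (fun (acc : Int) m =>
        if (!(PySem.Set.contains (flt.foldl (fun (x : PySem.Set Int) (e : Int × String) =>
              PySem.Set.add x (e.1 + 2 * PySem.Int.floordiv e.1 5)) (PySem.Set.ofList [])) m) &&
            ((PySem.Set.contains (flt.foldl (fun (x : PySem.Set Int) (e : Int × String) =>
              PySem.Set.add x (e.1 + 2 * PySem.Int.floordiv e.1 5)) (PySem.Set.ofList [])) (m - 1) &&
              (PySem.Set.contains (flt.foldl (fun (x : PySem.Set Int) (e : Int × String) =>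
              PySem.Set.add x (e.1 + 2 * PySem.Int.floordiv e.1 5)) (PySem.Set.ofList [])) (m + 1) ||
               PySem.Set.contains (flt.foldl (fun (x : PySem.Set Int) (e : Int × String) =>
              PySem.Set.add x (e.1 + 2 * PySem.Int.floordiv e.1 5)) (PySem.Set.ofList [])) (m + 2))) ||
             (PySem.Set.contains (flt.foldl (fun (x : PySem.Set Int) (e : Int × String) =>
              PySem.Set.add x (e.1 + 2 * PySem.Int.floordiv e.1 5)) (PySem.Set.ofList [])) (m - 2) &&
              !(PySem.Set.contains (flt.foldl (fun (x : PySem.Set Int) (e : Int × String) =>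
              PySem.Set.add x (e.1 + 2 * PySem.Int.floordiv e.1 5)) (PySem.Set.ofList [])) (m - 1)) &&
              PySem.Set.contains (flt.foldl (fun (x : PySem.Set Int) (e : Int × String) =>
              PySem.Set.add x (e.1 + 2 * PySem.Int.floordiv e.1 5)) (PySem.Set.ofList [])) (m + 1))))
        then acc + 1 else acc) 0
      = (((PySem.List.pyRange 1 W 1).countP (pvCond L) : Int)) := by
    rw [PySem.List.foldl_if_add_one]
    rw [List.countP_congr (q := pvCond L) (fun m _ => by
      simp only [Bool.and_eq_true, Bool.or_eq_true, Bool.not_eq_true',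
        ← Bool.not_eq_true, hmem, pvCond, decide_eq_true_eq]
      tauto)]
    simp
  -- facts about L: its elements and their order
  have hLmem : ∀ x ∈ L, ∃ k : Nat, k < calendar.length ∧
      x = (k : Int) + 2 * PySem.Int.floordiv (k : Int) 5 := by
    intro x hx
    obtain ⟨p, hp, rfl⟩ := List.mem_map.mp hx
    have hp' := List.mem_of_mem_filter hp
    rw [PySem.List.mem_enumerate_iff] at hp'
    obtain ⟨k, hk, rfl⟩ := hp'
    exact ⟨k, hk, by simp⟩
  have hpos : ∀ x ∈ L, 0 ≤ x := by
    intro x hx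
    obtain ⟨k, hk, rfl⟩ := hLmem x hx
    rw [PySem.Int.floordiv_eq_ediv_of_pos (by norm_num)]
    omega
  have hlt : ∀ x ∈ L, x < W := by
    intro x hx
    obtain ⟨k, hk, rfl⟩ := hLmem x hx
    rw [hW, PySem.Int.floordiv_eq_ediv_of_pos (by norm_num),
        PySem.Int.floordiv_eq_ediv_of_pos (by norm_num)]
    have hkn : (k : Int) < (calendar.length : Int) := by exact_mod_cast hk
    omega
  have hmono : ∀ i j : Int, i < j →
      i + 2 * PySem.Int.floordiv i 5 < j + 2 * PySem.Int.floordiv j 5 := by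
    intro i j hij
    rw [PySem.Int.floordiv_eq_ediv_of_pos (by norm_num), PySem.Int.floordiv_eq_ediv_of_pos (by norm_num)]
    omega
  have hpair : L.Pairwise (· < ·) := by
    rw [hL, List.pairwise_map]
    exact (List.Pairwise.sublist List.filter_sublist
      (PySem.List.pairwise_lt_enumerate calendar 0)).imp (fun h => hmono _ _ h)
  -- assemble
  rw [hint, countCond L W hpair hpos hlt, hcnt]
  have hA := sumA L
  rw [hL] at hA
  simp only [List.map_map, Function.comp_def]
  rw [hA]
  simp [hL]
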